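-- pv_equiv track=rewrite | github.com/itsStanley/bootcamp | 03_funkcje/Zadanie3.py | policz_znaki
-- ===== SOURCE A (Python) =====
-- def policz_znaki(tekst, start='<', end='>'):
--     licznik = 0
--     poziom = 0
--     for znak in tekst:
--         if znak == start:
--             poziom += 1
--         elif znak == end:
--             poziom -= 1
--         else:
--             licznik += poziom
--     return licznik
-- ===== SOURCE B (Python) =====
-- def policz_znaki(tekst, start='<', end='>'):
--     # each start/end bracket contributes +/- the number of non-bracket chars after it
--     n = sum(1 for c in tekst if c != start and c != end)
--     result = 0
--     seen = 0
--     for c in tekst: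
--         if c == start:
--             result += n - seen
--         elif c == end:
--             result -= n - seen
--         else:
--             seen += 1
--     return result
-- ===== Notes on version B (the rewrite author's own statement) =====
-- stated objective: alternative
-- what changed: Instead of carrying a running nesting level and adding it at each non-bracket char, B swaps the summation order: one pass counts the non-bracket chars, a second pass credits each start/end bracket with +/- the number of non-bracket chars after it.
import Mathlib
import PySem

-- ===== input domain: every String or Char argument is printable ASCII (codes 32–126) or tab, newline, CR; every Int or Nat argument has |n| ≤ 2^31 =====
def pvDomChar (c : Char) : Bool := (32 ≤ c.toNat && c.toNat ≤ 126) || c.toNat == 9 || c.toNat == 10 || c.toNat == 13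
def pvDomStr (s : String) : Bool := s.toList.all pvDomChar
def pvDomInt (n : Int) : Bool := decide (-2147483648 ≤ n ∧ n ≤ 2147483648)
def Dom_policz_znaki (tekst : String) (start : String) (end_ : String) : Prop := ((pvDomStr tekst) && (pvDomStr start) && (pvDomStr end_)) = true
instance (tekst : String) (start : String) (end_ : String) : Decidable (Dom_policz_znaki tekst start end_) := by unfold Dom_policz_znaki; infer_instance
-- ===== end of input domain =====

-- B replaces A's running nesting-level accumulation by a two-pass summation-order swap; same O(n) cost.

-- ===== PORT A =====
-- the loop: state (licznik, poziom), branch order exactly as in A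
def pzA (start end_ : String) : List Char → Int → Int → Int
  | [], licznik, _ => licznik
  | c :: cs, licznik, poziom =>
    if String.ofList [c] == start then pzA start end_ cs licznik (poziom + 1)
    else if String.ofList [c] == end_ then pzA start end_ cs licznik (poziom - 1)
    else pzA start end_ cs (licznik + poziom) poziom

def policz_znaki (tekst : String) (start : String) (end_ : String) : Int :=
  pzA start end_ tekst.toList 0 0

-- ===== PORT B =====
-- first pass: n = number of chars equal to neither start nor end
def pzN (start end_ : String) : List Char → Int
  | [] => 0
  | c :: cs =>
    (if String.ofList [c] != start && String.ofList [c] != end_ then (1 : Int) else 0) + pzN start end_ cs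

-- second pass: state (result, seen)
def pzB (start end_ : String) (n : Int) : List Char → Int → Int → Int
  | [], result, _ => result
  | c :: cs, result, seen =>
    if String.ofList [c] == start then pzB start end_ n cs (result + (n - seen)) seen
    else if String.ofList [c] == end_ then pzB start end_ n cs (result - (n - seen)) seen
    else pzB start end_ n cs result (seen + 1)

def policz_znaki_alt (tekst : String) (start : String) (end_ : String) : Int :=
  pzB start end_ (pzN start end_ tekst.toList) tekst.toList 0 0

-- ===== PRECONDITION & SPEC =====
def Spec_policz_znaki (tekst : String) (start : String) (end_ : String) (out : Int) : Prop := out = policz_znaki_alt tekst start end_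
instance (tekst : String) (start : String) (end_ : String) (out : Int) : Decidable (Spec_policz_znaki tekst start end_ out) := by unfold Spec_policz_znaki; infer_instance

-- ===== CLAIM (what is proved, stated in full; the proofs are below) =====
def Claim_equal_policz_znaki : Prop := ∀ (tekst : String) (start : String) (end_ : String), Dom_policz_znaki tekst start end_ → Spec_policz_znaki tekst start end_ (policz_znaki tekst start end_)

-- ===== LEMMAS AND PROOFS =====

-- loop invariant: A's fold from (l, p) equals l + p·(remaining non-bracket count)
-- plus B's fold contribution from (r, s), provided N - s = non-bracket count of the rest
theorem pz_key (start end_ : String) : ∀ (cs : List Char) (N l p r s : Int),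
    N - s = pzN start end_ cs →
    pzA start end_ cs l p = l + p * (N - s) + (pzB start end_ N cs r s - r) := by
  intro cs
  induction cs with
  | nil =>
    intro N l p r s hN
    have h0 : N - s = 0 := by simpa [pzN] using hN
    simp [pzA, pzB, h0]
  | cons c cs ih =>
    intro N l p r s hN
    by_cases h1 : (String.ofList [c] == start) = true
    · have hN' : N - s = pzN start end_ cs := by simpa [pzN, bne, h1] using hN
      have h := ih N l (p + 1) (r + (N - s)) s hN'
      simp [pzA, pzB, h1]
      linear_combination h
    · by_cases h2 : (String.ofList [c] == end_) = true
      · have hN' : N - s = pzN start end_ cs := by simpa [pzN, bne, h1, h2] using hN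
        have h := ih N l (p - 1) (r - (N - s)) s hN'
        simp [pzA, pzB, h1, h2]
        linear_combination h
      · have hN' : N - (s + 1) = pzN start end_ cs := by
          have : N - s = 1 + pzN start end_ cs := by simpa [pzN, bne, h1, h2] using hN
          omega
        have h := ih N (l + p) p r (s + 1) hN'
        simp [pzA, pzB, h1, h2]
        linear_combination h

-- ===== VERDICT (by name: the statement is the Claim_ definition above) =====
theorem policz_znaki_spec : Claim_equal_policz_znaki := by
  intro tekst start end_ _
  unfold Spec_policz_znaki policz_znaki policz_znaki_alt
  have h := pz_key start end_ tekst.toList (pzN start end_ tekst.toList) 0 0 0 0 (by ring)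
  simpa using h
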